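-- pv_equiv track=rewrite | github.com/NickkachuW/music-theory | generate_sax_scales.py | compute_note_positions
-- ===== SOURCE A (Python) =====
-- NATURAL_SEMITONES = {'C': 0, 'D': 2, 'E': 4, 'F': 5, 'G': 7, 'A': 9, 'B': 11}
--
-- def note_to_midi(letter, acc, octave):
--     return NATURAL_SEMITONES[letter] + acc + octave * 12
--
-- def compute_note_positions(notes, start_octave):
--     """Given a list of (letter, acc) for a scale, compute (letter, acc, octave) for each note,
--     ensuring ascending order."""
--     result = []
--     octave = start_octave
--     prev_midi = -1
--     for i, (letter, acc) in enumerate(notes):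
--         midi = note_to_midi(letter, acc, octave)
--         if i > 0 and midi <= prev_midi:
--             octave += 1
--             midi = note_to_midi(letter, acc, octave)
--         result.append((letter, acc, octave))
--         prev_midi = midi
--     return result
-- ===== SOURCE B (Python) =====
-- NATURAL_SEMITONES = {'C': 0, 'D': 2, 'E': 4, 'F': 5, 'G': 7, 'A': 9, 'B': 11}
--
-- def compute_note_positions(notes, start_octave):
--     """Three-phase decomposition: raw semitones, wrap flags between neighbours,
--     running-sum octaves, then zip.  The octave*12 terms of A's midi comparison
--     cancel, so the bump condition is just semis[i] <= semis[i-1]."""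
--     semis = [NATURAL_SEMITONES[l] + a for l, a in notes]
--     wraps = [1 if cur <= prev else 0 for prev, cur in zip(semis, semis[1:])]
--     octaves = [start_octave]
--     for w in wraps:
--         octaves.append(octaves[-1] + w)
--     return [(l, a, o) for (l, a), o in zip(notes, octaves)]
-- ===== Notes on version B (the rewrite author's own statement) =====
-- stated objective: alternative
-- what changed: Replaces A's stateful enumerate loop carrying (octave, prev_midi) and recomputing midi after a bump with a three-phase pipeline: a raw-semitone list (note_to_midi dropped since the octave*12 terms cancel), neighbour wrap flags, a running-sum octave list, and a final zip.
import Mathlib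
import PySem

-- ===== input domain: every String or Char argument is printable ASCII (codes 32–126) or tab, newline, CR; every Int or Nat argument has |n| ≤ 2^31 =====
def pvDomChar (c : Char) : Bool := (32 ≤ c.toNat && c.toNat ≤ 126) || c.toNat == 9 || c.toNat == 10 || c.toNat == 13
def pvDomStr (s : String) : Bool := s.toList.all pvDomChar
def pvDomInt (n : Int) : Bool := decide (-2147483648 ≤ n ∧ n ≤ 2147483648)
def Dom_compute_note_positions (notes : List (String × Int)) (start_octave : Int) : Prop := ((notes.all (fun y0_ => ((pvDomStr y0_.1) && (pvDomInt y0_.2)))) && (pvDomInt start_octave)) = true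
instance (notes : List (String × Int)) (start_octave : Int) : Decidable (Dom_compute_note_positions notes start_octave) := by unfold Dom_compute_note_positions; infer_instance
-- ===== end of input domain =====

-- B differs only in decomposition: same return value; neither side mutates its arguments.

-- ===== PORT A =====
-- NATURAL_SEMITONES (shared module constant)
def naturalSemitones : PySem.Dict String Int :=
  PySem.Dict.ofList [("C", 0), ("D", 2), ("E", 4), ("F", 5), ("G", 7), ("A", 9), ("B", 11)]

-- note_to_midi; the getD default 0 is never reached inside Pre_ (key present; outside Pre_ Python raises KeyError)
def note_to_midi (letter : String) (acc : Int) (octave : Int) : Int :=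
  PySem.Dict.getD naturalSemitones letter 0 + acc + octave * 12

-- the enumerate loop: state (i, octave, prev_midi), result built as we go
def goA : List (String × Int) → Nat → Int → Int → List (String × Int × Int)
  | [], _, _, _ => []
  | (letter, acc) :: rest, i, octave, prev_midi =>
    let midi := note_to_midi letter acc octave
    if i > 0 ∧ midi ≤ prev_midi then
      let octave' := octave + 1
      let midi' := note_to_midi letter acc octave'
      (letter, acc, octave') :: goA rest (i + 1) octave' midi'
    else
      (letter, acc, octave) :: goA rest (i + 1) octave midi

def compute_note_positions (notes : List (String × Int)) (start_octave : Int) : List (String × Int × Int) :=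
  goA notes 0 start_octave (-1)

-- ===== PORT B =====
-- semitone of a note, per Source B's comprehension
def semiOf (p : String × Int) : Int := PySem.Dict.getD naturalSemitones p.1 0 + p.2

def wrapFlag (prev cur : Int) : Int := if cur ≤ prev then 1 else 0

-- the octaves loop: octaves = [start]; for w in wraps: octaves.append(octaves[-1] + w)
def accOct : Int → List Int → List Int
  | o, [] => [o]
  | o, w :: ws => o :: accOct (o + w) ws

def compute_note_positions_alt (notes : List (String × Int)) (start_octave : Int) : List (String × Int × Int) :=
  let semis := notes.map semiOf
  let wraps := List.zipWith wrapFlag semis semis.tail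
  let octaves := accOct start_octave wraps
  List.zipWith (fun p o => (p.1, p.2, o)) notes octaves

-- ===== PRECONDITION & SPEC =====
-- Pre_ excludes exactly the inputs on which Python A raises KeyError: a letter outside NATURAL_SEMITONES.
def Pre_compute_note_positions (notes : List (String × Int)) (start_octave : Int) : Prop :=
  ∀ p ∈ notes, p.1 ∈ ["C", "D", "E", "F", "G", "A", "B"]
instance (notes : List (String × Int)) (start_octave : Int) : Decidable (Pre_compute_note_positions notes start_octave) := by unfold Pre_compute_note_positions; infer_instance

def pvWitness_compute_note_positions : (List (String × Int)) × Int :=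
  ([("C", 0), ("D", 0), ("B", -1)], 4)

def Spec_compute_note_positions (notes : List (String × Int)) (start_octave : Int) (out : List (String × Int × Int)) : Prop := out = compute_note_positions_alt notes start_octave
instance (notes : List (String × Int)) (start_octave : Int) (out : List (String × Int × Int)) : Decidable (Spec_compute_note_positions notes start_octave out) := by unfold Spec_compute_note_positions; infer_instance

-- ===== CLAIM (what is proved, stated in full; the proofs are below) =====
def Claim_equal_compute_note_positions : Prop := ∀ (notes : List (String × Int)) (start_octave : Int), Dom_compute_note_positions notes start_octave → Pre_compute_note_positions notes start_octave → Spec_compute_note_positions notes start_octave (compute_note_positions notes start_octave)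

-- ===== LEMMAS AND PROOFS =====

-- proof-only intermediate: B's octave stream phrased like A's loop (bump-then-emit, carrying prev semitone)
def accOct2 : Int → Int → List Int → List Int
  | _, _, [] => []
  | o, ps, s :: ss =>
    let o' := if s ≤ ps then o + 1 else o
    o' :: accOct2 o' s ss

lemma accOct2_eq_tail_accOct (ss : List Int) : ∀ (o ps : Int),
    accOct2 o ps ss = (accOct o (List.zipWith wrapFlag (ps :: ss) ss)).tail := by
  induction ss with
  | nil => intro o ps; simp [accOct2, accOct]
  | cons s ss2 ih =>
    intro o ps
    have hw : o + wrapFlag ps s = (if s ≤ ps then o + 1 else o) := by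
      simp [wrapFlag]; split_ifs <;> omega
    have hhead : ∀ (a : Int) (l : List Int), accOct a l = a :: (accOct a l).tail := by
      intro a l; cases l <;> simp [accOct]
    simp only [List.zipWith, accOct, accOct2, List.tail_cons]
    rw [hw, ih, ← hhead]

lemma goA_eq (rest : List (String × Int)) : ∀ (i : Nat) (oct ps : Int),
    goA rest (i + 1) oct (ps + 12 * oct) =
      List.zipWith (fun p o => (p.1, p.2, o)) rest (accOct2 oct ps (rest.map semiOf)) := by
  induction rest with
  | nil => intro i oct ps; simp [goA, accOct2]
  | cons p rest2 ih =>
    intro i oct ps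
    obtain ⟨letter, acc⟩ := p
    have hm : note_to_midi letter acc oct = semiOf (letter, acc) + 12 * oct := by
      simp [note_to_midi, semiOf]; ring
    by_cases h : semiOf (letter, acc) ≤ ps
    · have hc : (i + 1 > 0 ∧ note_to_midi letter acc oct ≤ ps + 12 * oct) := by
        constructor; · omega
        · rw [hm]; omega
      have hm' : note_to_midi letter acc (oct + 1) = semiOf (letter, acc) + 12 * (oct + 1) := by
        simp [note_to_midi, semiOf]; ring
      simp only [goA, List.map_cons, accOct2, if_pos h, List.zipWith]
      rw [if_pos hc, hm', ih]
    · have hc : ¬ (i + 1 > 0 ∧ note_to_midi letter acc oct ≤ ps + 12 * oct) := by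
        rw [hm]; intro ⟨_, h2⟩; omega
      simp only [goA, List.map_cons, accOct2, if_neg h, List.zipWith]
      rw [if_neg hc, hm, ih]

-- ===== VERDICT (by name: the statement is the Claim_ definition above) =====
theorem compute_note_positions_spec : Claim_equal_compute_note_positions := by
  intro notes start_octave _ _
  unfold Spec_compute_note_positions compute_note_positions compute_note_positions_alt
  cases notes with
  | nil => simp [goA]
  | cons p rest =>
    obtain ⟨letter, acc⟩ := p
    have hc : ¬ ((0 : Nat) > 0 ∧ note_to_midi letter acc start_octave ≤ -1) := by
      intro ⟨h, _⟩; omega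
    have hm : note_to_midi letter acc start_octave = semiOf (letter, acc) + 12 * start_octave := by
      simp [note_to_midi, semiOf]; ring
    simp only [goA, List.map_cons, List.tail_cons]
    rw [if_neg hc, hm, goA_eq rest 0 start_octave (semiOf (letter, acc)), accOct2_eq_tail_accOct]
    have hhead : ∀ (a : Int) (l : List Int), accOct a l = a :: (accOct a l).tail := by
      intro a l; cases l <;> simp [accOct]
    conv_rhs => rw [hhead]
    simp [List.zipWith]
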